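-- pv_equiv track=rewrite | github.com/nyiritb/bioinformatics | exercises/bioinformatics_stronghold/long.py | overlap_graph
-- ===== SOURCE A (Python) =====
-- def max_overlap(a, b):
--     for i in range(len(a)):
--         if a[i:] == b[:len(a)-i]:
--             return len(a)-i
--     return 0
--
-- def overlap_graph(strings):
--     edges = []
--     for s1 in strings:
--         for s2 in strings:
--             if s1 != s2:
--                 overlap = max_overlap(s1, s2)
--                 edges.append((s1, s2, overlap))
--     return edges
-- ===== SOURCE B (Python) =====
-- def max_overlap(a, b):
--     # longest k with suffix(a, k) == prefix(b, k), scanned upward as a max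
--     m = min(len(a), len(b))
--     return max((k for k in range(m + 1) if a.endswith(b[:k])), default=0)
--
-- def overlap_graph(strings):
--     # compute each distinct ordered pair once via a table, then emit by lookup
--     uniq = list(dict.fromkeys(strings))
--     ov = {(x, y): max_overlap(x, y) for x in uniq for y in uniq if x != y}
--     return [(s1, s2, ov[s1, s2]) for s1 in strings for s2 in strings if s1 != s2]
-- ===== Notes on version B (the rewrite author's own statement) =====
-- stated objective: alternative
-- what changed: B computes each pair's overlap as the maximum over ascending prefix lengths k with a.endswith(b[:k]) (instead of A's first-match scan over descending suffix slices), and computes it only once per distinct ordered pair via a precomputed table over deduplicated strings, emitting edges by lookup.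
import Mathlib
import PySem

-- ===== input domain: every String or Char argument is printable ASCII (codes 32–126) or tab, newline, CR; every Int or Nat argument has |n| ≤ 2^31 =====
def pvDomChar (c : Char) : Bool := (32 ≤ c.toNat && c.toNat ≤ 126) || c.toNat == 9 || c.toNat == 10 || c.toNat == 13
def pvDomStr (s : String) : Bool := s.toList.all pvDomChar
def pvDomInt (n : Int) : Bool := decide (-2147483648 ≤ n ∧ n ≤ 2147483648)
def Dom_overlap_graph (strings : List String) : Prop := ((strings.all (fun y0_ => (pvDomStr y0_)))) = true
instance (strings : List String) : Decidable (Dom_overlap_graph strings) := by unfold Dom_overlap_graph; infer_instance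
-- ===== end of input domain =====

-- B replaces A's first-match scan over descending suffix slices by a max over ascending
-- prefix lengths (endswith), computed once per distinct ordered pair via a lookup table
-- (objective: alternative structure, same results).

-- ===== PORT A =====
def maxOverlapGo (a b : String) : List Int → Int
  | [] => 0
  | i :: rest =>
      if PySem.Str.slice a (some i) none == PySem.Str.slice b none (some (PySem.Str.len a - i))
      then PySem.Str.len a - i
      else maxOverlapGo a b rest

def max_overlap (a b : String) : Int :=
  maxOverlapGo a b (PySem.List.pyRange 0 (PySem.Str.len a) 1)

def overlap_graph (strings : List String) : List (String × String × Int) :=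
  strings.foldl (fun edges s1 =>
    strings.foldl (fun edges s2 =>
      if s1 != s2 then edges ++ [(s1, s2, max_overlap s1 s2)] else edges) edges) []

-- ===== PORT B =====
def max_overlap_alt (a b : String) : Int :=
  let m := min (PySem.Str.len a) (PySem.Str.len b)
  ((PySem.List.max? ((PySem.List.pyRange 0 (m + 1) 1).filter
      (fun k => PySem.Str.endswith a (PySem.Str.slice b none (some k)))) (fun k => k)).getD 0)

def overlap_graph_alt (strings : List String) : List (String × String × Int) :=
  let uniq := PySem.List.dedup strings
  let ov : PySem.Dict (String × String) Int :=
    uniq.foldl (fun d x =>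
      uniq.foldl (fun d y =>
        if x != y then d.insert (x, y) (max_overlap_alt x y) else d) d) PySem.Dict.empty
  -- ov[s1, s2]: the key is always present (s1, s2 ∈ uniq, s1 ≠ s2), so getD is exact
  strings.flatMap (fun s1 =>
    (strings.filter (fun s2 => s1 != s2)).map (fun s2 => (s1, s2, ov.getD (s1, s2) 0)))

-- ===== PRECONDITION & SPEC =====
def Spec_overlap_graph (strings : List String) (out : List (String × String × Int)) : Prop := out = overlap_graph_alt strings
instance (strings : List String) (out : List (String × String × Int)) : Decidable (Spec_overlap_graph strings out) := by unfold Spec_overlap_graph; infer_instance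

-- ===== CLAIM (what is proved, stated in full; the proofs are below) =====
def Claim_equal_overlap_graph : Prop := ∀ (strings : List String), Dom_overlap_graph strings → Spec_overlap_graph strings (overlap_graph strings)

-- ===== LEMMAS AND PROOFS =====

-- ovBest A B n = the largest k ≤ n with drop (|A|-k) A = take k B (0 always qualifies)
def ovBest (A B : List Char) : Nat → Nat
  | 0 => 0
  | k+1 => if A.drop (A.length - (k+1)) = B.take (k+1) then k+1 else ovBest A B k

theorem ovBest_le (A B : List Char) (n : Nat) : ovBest A B n ≤ n := by
  induction n with
  | zero => simp [ovBest]
  | succ k ih => unfold ovBest; split <;> omega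

theorem ovBest_spec (A B : List Char) (n : Nat) :
    A.drop (A.length - ovBest A B n) = B.take (ovBest A B n) := by
  induction n with
  | zero => simp [ovBest]
  | succ k ih => unfold ovBest; split <;> simp_all

theorem ovBest_max (A B : List Char) (n j : Nat) (hj : j ≤ n)
    (hQ : A.drop (A.length - j) = B.take j) : j ≤ ovBest A B n := by
  induction n with
  | zero => omega
  | succ k ih =>
      unfold ovBest; split
      · omega
      · rcases Nat.lt_or_ge j (k+1) with h | h
        · exact ih (by omega)
        · exfalso; have : j = k + 1 := by omega
          subst this; simp_all

theorem ovQ_le (A B : List Char) (k : Nat) (hk : k ≤ A.length)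
    (hQ : A.drop (A.length - k) = B.take k) : k ≤ B.length := by
  have := congrArg List.length hQ
  simp [List.length_drop, List.length_take] at this
  omega

theorem ovBest_min_eq (A B : List Char) (n : Nat)
    (h1 : min A.length B.length ≤ n) (h2 : n ≤ A.length) :
    ovBest A B n = ovBest A B (min A.length B.length) := by
  induction n with
  | zero =>
      have h0 : min A.length B.length = 0 := by omega
      rw [h0]
  | succ k ih =>
      rcases Nat.eq_or_lt_of_le h1 with h | h
      · rw [← h]
      · have hne : ¬ (A.drop (A.length - (k+1)) = B.take (k+1)) := by
          intro hQ
          have := ovQ_le A B (k+1) h2 hQ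
          omega
        rw [show ovBest A B (k+1)
              = if A.drop (A.length - (k+1)) = B.take (k+1) then k+1 else ovBest A B k from rfl,
           if_neg hne]
        exact ih (by omega) (by omega)

-- A's scan from i = |A| - n upward computes ovBest n
theorem maxOverlapGo_eq (a b : String) (n : Nat) (hn : n ≤ a.toList.length) :
    maxOverlapGo a b (PySem.List.pyRange ((a.toList.length : Int) - n) (a.toList.length) 1)
      = (ovBest a.toList b.toList n : Int) := by
  induction n with
  | zero =>
      rw [PySem.List.pyRange_one_eq_nil (by omega)]
      simp [maxOverlapGo, ovBest]
  | succ k ih =>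
      have hc : ((k+1 : Nat) : Int) = (k : Int) + 1 := by push_cast; ring
      rw [hc, PySem.List.pyRange_one_cons (by omega)]
      have hcond : (PySem.Str.slice a (some ((a.toList.length : Int) - ((k:Int)+1))) none
              == PySem.Str.slice b none (some (PySem.Str.len a - ((a.toList.length : Int) - ((k:Int)+1))))) = true
          ↔ a.toList.drop (a.toList.length - (k+1)) = b.toList.take (k+1) := by
        rw [beq_iff_eq, String.ext_iff]
        have h1 : (PySem.Str.slice a (some ((a.toList.length : Int) - ((k:Int)+1))) none).toList
            = a.toList.drop (a.toList.length - (k+1)) := by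
          rw [PySem.Str.toList_slice, PySem.Chars.slice_eq_listSlice,
              PySem.List.slice_from _ (by omega)]
          congr 1
          omega
        have h2 : (PySem.Str.slice b none (some (PySem.Str.len a - ((a.toList.length : Int) - ((k:Int)+1))))).toList
            = b.toList.take (k+1) := by
          have he : PySem.Str.len a - ((a.toList.length : Int) - ((k:Int)+1)) = (k:Int)+1 := by
            simp [PySem.Str.len_eq]
          rw [he, PySem.Str.toList_slice, PySem.Chars.slice_eq_listSlice,
              PySem.List.slice_to _ (by omega)]
          congr 1
        rw [h1, h2]
      show (if PySem.Str.slice a (some ((a.toList.length : Int) - ((k:Int)+1))) none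
               == PySem.Str.slice b none (some (PySem.Str.len a - ((a.toList.length : Int) - ((k:Int)+1))))
            then PySem.Str.len a - ((a.toList.length : Int) - ((k:Int)+1))
            else maxOverlapGo a b (PySem.List.pyRange ((a.toList.length : Int) - ((k:Int)+1) + 1) (a.toList.length) 1))
          = (ovBest a.toList b.toList (k+1) : Int)
      have harith : (a.toList.length : Int) - ((k:Int)+1) + 1 = (a.toList.length : Int) - (k : Nat) := by
        omega
      rw [harith]
      rw [show ovBest a.toList b.toList (k+1)
            = if a.toList.drop (a.toList.length - (k+1)) = b.toList.take (k+1) then k+1 else ovBest a.toList b.toList k from rfl]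
      by_cases hQ : a.toList.drop (a.toList.length - (k+1)) = b.toList.take (k+1)
      · rw [if_pos (hcond.mpr hQ), if_pos hQ]
        simp [PySem.Str.len_eq]
      · rw [if_neg (fun h => hQ (hcond.mp h)), if_neg hQ, ih (by omega)]


theorem max_overlap_eq (a b : String) :
    max_overlap a b = (ovBest a.toList b.toList (min a.toList.length b.toList.length) : Int) := by
  have h := maxOverlapGo_eq a b a.toList.length le_rfl
  rw [show ((a.toList.length : Int) - (a.toList.length : Nat)) = 0 from by omega] at h
  unfold max_overlap
  have hl : PySem.Str.len a = (a.toList.length : Int) := by simp [PySem.Str.len_eq]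
  rw [hl, h, ovBest_min_eq a.toList b.toList a.toList.length (by omega) le_rfl]


-- B's filtered-range condition agrees with the suffix=prefix predicate below min
theorem endswith_iff_Q (a b : String) (k : Nat)
    (hk : k ≤ min a.toList.length b.toList.length) :
    (PySem.Str.endswith a (PySem.Str.slice b none (some (k : Int))) = true)
      ↔ a.toList.drop (a.toList.length - k) = b.toList.take k := by
  rw [PySem.Str.endswith_eq, PySem.Str.toList_slice, PySem.Chars.slice_eq_listSlice,
      PySem.List.slice_to _ (by omega), PySem.Chars.endswith_iff]
  rw [show ((k : Int)).toNat = k from by omega]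
  constructor
  · rintro ⟨t, ht⟩
    have hlt : (b.toList.take k).length = k := by
      rw [List.length_take]; omega
    have hlen : t.length = a.toList.length - k := by
      have := congrArg List.length ht
      rw [List.length_append, hlt] at this
      omega
    rw [show a.toList.length - k = t.length from by omega, ← ht, List.drop_left]
  · intro hQ
    rw [← hQ]
    exact List.drop_suffix _ _


theorem max_overlap_alt_eq (a b : String) :
    max_overlap_alt a b = (ovBest a.toList b.toList (min a.toList.length b.toList.length) : Int) := by
  unfold max_overlap_alt
  have hm : min (PySem.Str.len a) (PySem.Str.len b) = ((min a.toList.length b.toList.length : Nat) : Int) := by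
    simp [PySem.Str.len_eq]
  rw [hm]
  set m := min a.toList.length b.toList.length with hmdef
  set P : Int → Bool := fun k => PySem.Str.endswith a (PySem.Str.slice b none (some k)) with hP
  set ks := (PySem.List.pyRange 0 ((m : Int) + 1) 1).filter P with hks
  have hbest_le : ovBest a.toList b.toList m ≤ m := ovBest_le _ _ _
  have h0 : ((ovBest a.toList b.toList m : Nat) : Int) ∈ ks := by
    rw [hks, List.mem_filter]
    refine ⟨(PySem.List.mem_pyRange_one).mpr ⟨by omega, by omega⟩, ?_⟩
    rw [hP]
    exact (endswith_iff_Q a b _ (by omega)).mpr (ovBest_spec _ _ _)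
  have hmax : ∀ y ∈ ks, y ≤ ((ovBest a.toList b.toList m : Nat) : Int) := by
    intro y hy
    rw [hks, List.mem_filter] at hy
    obtain ⟨hyr, hyP⟩ := hy
    rw [PySem.List.mem_pyRange_one] at hyr
    have hy0 : y = ((y.toNat : Nat) : Int) := by omega
    rw [hy0] at hyP
    rw [hP] at hyP
    have hQ := (endswith_iff_Q a b y.toNat (by omega)).mp hyP
    have := ovBest_max a.toList b.toList m y.toNat (by omega) hQ
    omega
  show (PySem.List.max? ks (fun k => k)).getD 0 = ((ovBest a.toList b.toList m : Nat) : Int)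
  cases hv : PySem.List.max? ks (fun k => k) with
  | none =>
      exact absurd ((PySem.List.max?_eq_none_iff ks (fun k => k)).mp hv ▸ h0) (List.not_mem_nil)
  | some v =>
      have h1 : v ≤ ((ovBest a.toList b.toList m : Nat) : Int) := hmax v (PySem.List.max?_mem hv)
      have h2 : ((ovBest a.toList b.toList m : Nat) : Int) ≤ v := PySem.List.max?_isMax hv _ h0
      simp only [Option.getD_some]
      omega


theorem max_overlap_core (a b : String) : max_overlap a b = max_overlap_alt a b := by
  rw [max_overlap_eq, max_overlap_alt_eq]

-- dict lookup lemmas for B's table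
theorem inner_getD (f : String → String → Int) (x : String) (l2 : List String)
    (d : PySem.Dict (String × String) Int) (x' y' : String) :
    (l2.foldl (fun d y => if x != y then d.insert (x, y) (f x y) else d) d).getD (x', y') 0
      = if x' = x ∧ y' ∈ l2 ∧ x' ≠ y' then f x y' else d.getD (x', y') 0 := by
  induction l2 generalizing d with
  | nil => simp
  | cons y t ih =>
      simp only [List.foldl_cons]
      rw [ih]
      have hstep : (if x != y then d.insert (x, y) (f x y) else d).getD (x', y') 0
          = if x' = x ∧ y' = y ∧ x ≠ y then f x y else d.getD (x', y') 0 := by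
        by_cases hxy : x = y
        · subst hxy
          simp
        · rw [if_pos (by simpa using hxy), PySem.Dict.getD_insert]
          simp [Prod.ext_iff, hxy]
      rw [hstep]
      by_cases h1 : x' = x ∧ y' ∈ t ∧ x' ≠ y'
      · rw [if_pos h1, if_pos ⟨h1.1, by simp [h1.2.1], h1.2.2⟩]
      · rw [if_neg h1]
        by_cases h2 : x' = x ∧ y' = y ∧ x ≠ y
        · rw [if_pos h2, if_pos ⟨h2.1, by simp [h2.2.1], by rw [h2.1, h2.2.1]; exact h2.2.2⟩,
             h2.2.1]
        · rw [if_neg h2, if_neg ?_]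
          rintro ⟨ha, hb, hc⟩
          rcases List.mem_cons.mp hb with hy | hy
          · exact h2 ⟨ha, hy, by rw [← ha, ← hy]; exact hc⟩
          · exact h1 ⟨ha, hy, hc⟩

theorem outer_getD (f : String → String → Int) (l1 l2 : List String)
    (d : PySem.Dict (String × String) Int) (x' y' : String) :
    (l1.foldl (fun d x => l2.foldl (fun d y => if x != y then d.insert (x, y) (f x y) else d) d) d).getD (x', y') 0
      = if x' ∈ l1 ∧ y' ∈ l2 ∧ x' ≠ y' then f x' y' else d.getD (x', y') 0 := by
  induction l1 generalizing d with
  | nil => simp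
  | cons x t ih =>
      simp only [List.foldl_cons]
      rw [ih, inner_getD]
      by_cases h1 : x' ∈ t ∧ y' ∈ l2 ∧ x' ≠ y'
      · rw [if_pos h1, if_pos ⟨by simp [h1.1], h1.2.1, h1.2.2⟩]
      · rw [if_neg h1]
        by_cases h2 : x' = x ∧ y' ∈ l2 ∧ x' ≠ y'
        · rw [if_pos h2, if_pos ⟨by simp [h2.1], h2.2.1, h2.2.2⟩, h2.1]
        · rw [if_neg h2, if_neg ?_]
          rintro ⟨ha, hb, hc⟩
          rcases List.mem_cons.mp ha with hx | hx
          · exact h2 ⟨hx, hb, hc⟩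
          · exact h1 ⟨hx, hb, hc⟩

theorem flatMap_congr_mem {α β : Type} (l : List α) (f g : α → List β)
    (h : ∀ x ∈ l, f x = g x) : l.flatMap f = l.flatMap g := by
  induction l with
  | nil => rfl
  | cons a t ih =>
      simp only [List.flatMap_cons, h a (by simp), ih (fun x hx => h x (by simp [hx]))]

-- ===== VERDICT (by name: the statement is the Claim_ definition above) =====
theorem overlap_graph_spec : Claim_equal_overlap_graph := by
  intro strings _
  unfold Spec_overlap_graph overlap_graph overlap_graph_alt
  have hfun : (fun (edges : List (String × String × Int)) (s1 : String) =>
        strings.foldl (fun edges s2 => if s1 != s2 then edges ++ [(s1, s2, max_overlap s1 s2)] else edges) edges)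
      = fun edges s1 => edges ++ (strings.filter (fun s2 => s1 != s2)).map (fun s2 => (s1, s2, max_overlap s1 s2)) := by
    funext edges s1
    exact PySem.List.foldl_append_if _ _ _ _
  rw [hfun, PySem.List.foldl_append_eq_flatMap, List.nil_append]
  apply flatMap_congr_mem
  intro s1 hs1
  apply List.map_congr_left
  intro s2 hs2
  rw [List.mem_filter] at hs2
  have hne : s1 ≠ s2 := by simpa using hs2.2
  have hgd : (((PySem.List.dedup strings).foldl (fun d x =>
        (PySem.List.dedup strings).foldl (fun d y =>
          if x != y then d.insert (x, y) (max_overlap_alt x y) else d) d) PySem.Dict.empty).getD (s1, s2) 0)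
      = max_overlap_alt s1 s2 := by
    rw [outer_getD]
    exact if_pos ⟨(PySem.List.mem_dedup strings s1).mpr hs1,
                  (PySem.List.mem_dedup strings s2).mpr hs2.1, hne⟩
  rw [hgd, max_overlap_core]
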